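-- pv_equiv track=rewrite | github.com/facebookresearch/ELF | rts/engine/compile_cmds.py | get_class_and_enum_name
-- ===== SOURCE A (Python) =====
-- def get_class_and_enum_name(s):
--     classname = "Cmd" + s
--     enum_name = s[0].upper()
--     for i in range(len(s) - 1):
--         if s[i].islower() and s[i + 1].isupper():
--             enum_name += "_"
--         enum_name += s[i + 1].upper()
--     return classname, enum_name
-- ===== SOURCE B (Python) =====
-- def get_class_and_enum_name(s):
--     cuts = [i for i in range(1, len(s)) if s[i - 1].islower() and s[i].isupper()]
--     bounds = [0] + cuts + [len(s)]
--     words = [s[a:b] for a, b in zip(bounds, bounds[1:])]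
--     return "Cmd" + s, "_".join(words).upper()
-- ===== Notes on version B (the rewrite author's own statement) =====
-- stated objective: idiomatic
-- what changed: Replaces A's single char-by-char pass that interleaves uppercasing with conditional underscore concatenation by a staged word-segmentation: first compute the list of boundary indices, then slice the string into words at those indices, then join the words with underscores and uppercase the whole result once.
-- outside the precondition, e.g. on get_class_and_enum_name(''): A raises IndexError, B returns ('Cmd', '')
import Mathlib
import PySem

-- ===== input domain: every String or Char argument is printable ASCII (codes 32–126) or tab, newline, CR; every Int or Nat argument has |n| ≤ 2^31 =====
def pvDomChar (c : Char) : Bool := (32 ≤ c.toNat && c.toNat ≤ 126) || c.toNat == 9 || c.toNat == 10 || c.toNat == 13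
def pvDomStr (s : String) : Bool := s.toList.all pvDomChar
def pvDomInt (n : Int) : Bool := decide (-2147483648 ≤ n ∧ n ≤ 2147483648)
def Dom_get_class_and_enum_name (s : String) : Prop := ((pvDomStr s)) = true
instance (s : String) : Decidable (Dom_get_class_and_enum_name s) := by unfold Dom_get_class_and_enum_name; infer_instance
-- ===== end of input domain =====

-- B replaces A's char-by-char pass (interleaved uppercasing and conditional underscores)
-- by staged word segmentation: compute boundary indices, slice into words, join the words
-- with underscores, uppercase once (objective: idiomatic).

-- ===== PORT A =====
-- the body of A's `for i in range(len(s) - 1)` loop, as a named helper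
def pvStepA (cs : List Char) (acc : List Char) (i : Int) : List Char :=
  let acc := if PySem.Chars.islower (PySem.List.pyGetD cs i ' ')
                && PySem.Chars.isupper (PySem.List.pyGetD cs (i + 1) ' ')
             then acc ++ ['_'] else acc
  acc ++ [PySem.Chars.upperChar (PySem.List.pyGetD cs (i + 1) ' ')]

def get_class_and_enum_name (s : String) : String × String :=
  let classname := "Cmd" ++ s
  let cs := s.toList
  match PySem.List.pyGet? cs 0 with
  | none => (classname, "")   -- Python raises IndexError here (s = ""); excluded by Pre_
  | some c0 =>
    let enum := (PySem.List.pyRange 0 ((cs.length : Int) - 1) 1).foldl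
      (pvStepA cs) [PySem.Chars.upperChar c0]
    (classname, String.ofList enum)

-- ===== PORT B =====
def get_class_and_enum_name_alt (s : String) : String × String :=
  let cs := s.toList
  let cuts := (PySem.List.pyRange 1 (cs.length : Int) 1).filter
      (fun i => PySem.Chars.islower (PySem.List.pyGetD cs (i - 1) ' ')
             && PySem.Chars.isupper (PySem.List.pyGetD cs i ' '))
  let bounds := 0 :: cuts ++ [(cs.length : Int)]
  let words := (List.zip bounds bounds.tail).map
      (fun p => PySem.List.slice cs (some p.1) (some p.2))
  ("Cmd" ++ s,
   String.ofList (PySem.Chars.upper (PySem.Chars.join ['_'] words)))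

-- ===== PRECONDITION & SPEC =====
-- Pre_ excludes only the empty string, on which A raises IndexError (s[0]).
def Pre_get_class_and_enum_name (s : String) : Prop := s ≠ ""
instance (s : String) : Decidable (Pre_get_class_and_enum_name s) := by unfold Pre_get_class_and_enum_name; infer_instance
def pvWitness_get_class_and_enum_name : String := "abC"

def Spec_get_class_and_enum_name (s : String) (out : String × String) : Prop := out = get_class_and_enum_name_alt s
instance (s : String) (out : String × String) : Decidable (Spec_get_class_and_enum_name s out) := by unfold Spec_get_class_and_enum_name; infer_instance

-- ===== CLAIM (what is proved, stated in full; the proofs are below) =====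
def Claim_equal_get_class_and_enum_name : Prop := ∀ (s : String), Dom_get_class_and_enum_name s → Pre_get_class_and_enum_name s → Spec_get_class_and_enum_name s (get_class_and_enum_name s)

-- ===== LEMMAS AND PROOFS =====

-- the common normal form of the enum-name tail (one entry per adjacent pair)
def pvPairs : List Char → List Char
  | a :: b :: t =>
      (if PySem.Chars.islower a && PySem.Chars.isupper b then ['_'] else [])
        ++ PySem.Chars.upperChar b :: pvPairs (b :: t)
  | _ => []

theorem pvPairs_short (l : List Char) (h : l.length ≤ 1) : pvPairs l = [] := by
  match l with
  | [] => rfl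
  | [a] => rfl
  | a :: b :: t => simp at h

-- A's loop computes pvPairs of the suffix
theorem loopA (cs : List Char) (m : Nat) : ∀ (k : Nat) (acc : List Char),
    m = cs.length - 1 - k →
    (PySem.List.pyRange (k : Int) ((cs.length : Int) - 1) 1).foldl (pvStepA cs) acc
      = acc ++ pvPairs (cs.drop k) := by
  induction m with
  | zero =>
      intro k acc h
      rw [PySem.List.pyRange_one_eq_nil (by omega)]
      rw [pvPairs_short _ (by simp; omega)]
      simp
  | succ m ih =>
      intro k acc h
      have hk1 : k + 1 < cs.length := by omega
      have hk : k < cs.length := by omega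
      rw [PySem.List.pyRange_one_cons (by omega)]
      simp only [List.foldl_cons]
      have hcast : (k : Int) + 1 = ((k + 1 : Nat) : Int) := by push_cast; ring
      rw [hcast, ih (k + 1) _ (by omega)]
      have hdrop : cs.drop k = cs[k] :: cs.drop (k + 1) := List.drop_eq_getElem_cons hk
      have hdrop1 : cs.drop (k + 1) = cs[k + 1] :: cs.drop (k + 2) :=
        List.drop_eq_getElem_cons hk1
      rw [hdrop, hdrop1, pvPairs, ← hdrop1]
      simp only [pvStepA, hcast, PySem.List.pyGetD_natCast,
        List.getD_eq_getElem cs ' ' hk, List.getD_eq_getElem cs ' ' hk1]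
      split_ifs <;> simp

-- B-side proof infrastructure: Nat-level boundary test, cut list, and joined segments
def pvBnd (cs : List Char) (i : Nat) : Bool :=
  PySem.Chars.islower (cs.getD (i - 1) ' ') && PySem.Chars.isupper (cs.getD i ' ')

def pvCutsFrom (cs : List Char) (a : Nat) : List Nat :=
  (List.range' (a + 1) (cs.length - (a + 1))).filter (pvBnd cs)

-- the underscore-join of the segments cut at a :: L (up to the end of cs), written recursively
def pvSegJoin (cs : List Char) (a : Nat) : List Nat → List Char
  | [] => cs.drop a
  | b :: L => (cs.drop a).take (b - a) ++ '_' :: pvSegJoin cs b L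

theorem pyRange_one_natCast (m : Nat) : ∀ (a n : Nat), m = n - a →
    PySem.List.pyRange (a : Int) (n : Int) 1 = (List.range' a (n - a)).map (Nat.cast) := by
  induction m with
  | zero =>
      intro a n h
      rw [PySem.List.pyRange_one_eq_nil (by omega)]
      simp [show n - a = 0 from by omega]
  | succ m ih =>
      intro a n h
      rw [PySem.List.pyRange_one_cons (by omega)]
      have hcast : (a : Int) + 1 = ((a + 1 : Nat) : Int) := by push_cast; ring
      rw [hcast, ih (a + 1) n (by omega)]
      rw [show n - a = (n - (a + 1)) + 1 from by omega, List.range'_succ]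
      rfl

-- the underscore-join of B's word list equals pvSegJoin of the cut list
theorem join_segments (cs : List Char) : ∀ (L : List Nat) (a : Nat),
    PySem.Chars.join ['_']
      ((List.zip (a :: (L ++ [cs.length])) (L ++ [cs.length])).map
        (fun p => (cs.drop p.1).take (p.2 - p.1)))
      = pvSegJoin cs a L := by
  intro L
  induction L with
  | nil =>
      intro a
      simp only [List.nil_append, List.zip_cons_cons, List.zip_nil_right, List.map_cons,
        List.map_nil, PySem.Chars.join_singleton, pvSegJoin]
      exact List.take_of_length_le (le_of_eq (List.length_drop))
  | cons b L ih =>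
      intro a
      obtain ⟨q, qs, hq⟩ := List.exists_cons_of_ne_nil
        (show L ++ [cs.length] ≠ [] by simp)
      have ihb := ih b
      simp only [List.cons_append, hq, List.zip_cons_cons, List.map_cons,
        PySem.Chars.join_cons_cons] at ihb ⊢
      rw [ihb]
      simp [pvSegJoin]

-- shifting the start of pvSegJoin past one non-cut character peels it off
theorem segShift (cs : List Char) (a : Nat) (ha : a < cs.length) (L : List Nat)
    (hL : ∀ b ∈ L, a + 1 ≤ b) :
    pvSegJoin cs a L = cs[a] :: pvSegJoin cs (a + 1) L := by
  cases L with
  | nil => rw [pvSegJoin, pvSegJoin, List.drop_eq_getElem_cons ha]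
  | cons b L =>
      have hb : a + 1 ≤ b := hL b (by simp)
      simp only [pvSegJoin, List.drop_eq_getElem_cons ha,
        show b - a = (b - (a + 1)) + 1 from by omega, List.take_succ_cons,
        List.cons_append]

-- the joined, uppercased segmentation equals the pvPairs normal form
theorem segJoin_cuts (cs : List Char) (m : Nat) : ∀ (a : Nat) (ha : a < cs.length),
    m = cs.length - 1 - a →
    List.map PySem.Chars.upperChar (pvSegJoin cs a (pvCutsFrom cs a))
      = PySem.Chars.upperChar cs[a] :: pvPairs (cs.drop a) := by
  induction m with
  | zero =>
      intro a ha h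
      have hcuts : pvCutsFrom cs a = [] := by
        simp [pvCutsFrom, show cs.length - (a + 1) = 0 from by omega]
      have hdrop : cs.drop a = cs[a] :: cs.drop (a + 1) := List.drop_eq_getElem_cons ha
      have hnil : cs.drop (a + 1) = [] := List.drop_eq_nil_of_le (by omega)
      rw [hcuts, pvSegJoin, hdrop, hnil, pvPairs_short _ (by simp)]
      simp
  | succ m ih =>
      intro a ha h
      have ha1 : a + 1 < cs.length := by omega
      have hrange : pvCutsFrom cs a
          = ((a + 1) :: List.range' (a + 2) (cs.length - (a + 2))).filter (pvBnd cs) := by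
        rw [pvCutsFrom, show cs.length - (a + 1) = (cs.length - (a + 2)) + 1 from by omega,
          List.range'_succ]
      have hdrop : cs.drop a = cs[a] :: cs.drop (a + 1) := List.drop_eq_getElem_cons ha
      have hdrop1 : cs.drop (a + 1) = cs[a + 1] :: cs.drop (a + 2) :=
        List.drop_eq_getElem_cons ha1
      have hbnd : pvBnd cs (a + 1)
          = (PySem.Chars.islower cs[a] && PySem.Chars.isupper cs[a + 1]) := by
        simp [pvBnd, List.getElem?_eq_getElem ha, List.getElem?_eq_getElem ha1]
      have hih := ih (a + 1) ha1 (by omega)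
      have hpairs : pvPairs (cs.drop a)
          = (if PySem.Chars.islower cs[a] && PySem.Chars.isupper cs[a + 1] then ['_'] else [])
              ++ PySem.Chars.upperChar cs[a + 1] :: pvPairs (cs.drop (a + 1)) := by
        rw [hdrop, hdrop1, pvPairs, ← hdrop1]
      rw [hrange, List.filter_cons, hbnd]
      by_cases hc : (PySem.Chars.islower cs[a] && PySem.Chars.isupper cs[a + 1]) = true
      · rw [if_pos hc]
        have : (List.range' (a + 2) (cs.length - (a + 2))).filter (pvBnd cs)
            = pvCutsFrom cs (a + 1) := by
          rw [pvCutsFrom]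
        rw [this, pvSegJoin, hdrop, show a + 1 - a = 1 from by omega,
          List.take_succ_cons, List.take_zero]
        simp only [List.cons_append, List.nil_append, List.map_cons, hih]
        rw [show PySem.Chars.upperChar '_' = '_' from by decide]
        simp [hpairs, hc]
      · rw [if_neg hc]
        have hfe : (List.range' (a + 2) (cs.length - (a + 2))).filter (pvBnd cs)
            = pvCutsFrom cs (a + 1) := by
          rw [pvCutsFrom]
        rw [hfe, segShift cs a ha _ (fun b hb => by
          have := List.mem_range'_1.mp (List.mem_of_mem_filter (by
            simpa [pvCutsFrom] using hb))
          omega)]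
        simp only [List.map_cons, hih, hpairs, if_neg hc, List.nil_append]

-- ===== VERDICT (by name: the statement is the Claim_ definition above) =====
theorem get_class_and_enum_name_spec : Claim_equal_get_class_and_enum_name := by
  intro s _ hpre
  have hne : s.toList ≠ [] := by
    simpa [String.toList_eq_nil_iff] using hpre
  obtain ⟨c, t, hct⟩ := List.exists_cons_of_ne_nil hne
  unfold Spec_get_class_and_enum_name get_class_and_enum_name get_class_and_enum_name_alt
  rw [hct]
  dsimp only
  rw [PySem.List.pyGet?_zero_cons]
  dsimp only
  -- A side collapses to the pvPairs normal form
  have hA := loopA (c :: t) ((c :: t).length - 1 - 0) 0 [PySem.Chars.upperChar c] rfl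
  simp only [Nat.cast_zero, List.drop_zero, List.singleton_append] at hA
  rw [hA]
  -- B side: the cut list as a Nat list
  have hr : PySem.List.pyRange 1 (((c :: t).length : Int)) 1
      = (List.range' 1 ((c :: t).length - 1)).map (Nat.cast) := by
    have := pyRange_one_natCast ((c :: t).length - 1) 1 (c :: t).length rfl
    simpa using this
  have hfilter : (PySem.List.pyRange 1 (((c :: t).length : Int)) 1).filter
        (fun i => PySem.Chars.islower (PySem.List.pyGetD (c :: t) (i - 1) ' ')
               && PySem.Chars.isupper (PySem.List.pyGetD (c :: t) i ' '))
      = (pvCutsFrom (c :: t) 0).map (Nat.cast) := by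
    rw [hr, List.filter_map]
    have heq : ((List.range' 1 ((c :: t).length - 1)).filter
        ((fun i => PySem.Chars.islower (PySem.List.pyGetD (c :: t) (i - 1) ' ')
               && PySem.Chars.isupper (PySem.List.pyGetD (c :: t) i ' ')) ∘ (Nat.cast)))
        = pvCutsFrom (c :: t) 0 := by
      rw [show pvCutsFrom (c :: t) 0
          = (List.range' 1 ((c :: t).length - 1)).filter (pvBnd (c :: t)) from rfl]
      refine List.filter_congr ?_
      intro i hi
      have h1 : 1 ≤ i := (List.mem_range'_1.mp hi).1
      have hi1 : ((i : Int) - 1) = ((i - 1 : Nat) : Int) := by omega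
      simp [Function.comp, hi1, pvBnd]
    rw [heq]
  rw [hfilter]
  -- bounds, words, join
  have hbounds : (0 : Int) :: (pvCutsFrom (c :: t) 0).map (Nat.cast) ++ [(((c :: t).length : Nat) : Int)]
      = ((0 :: (pvCutsFrom (c :: t) 0 ++ [(c :: t).length])).map (Nat.cast)) := by
    simp
  rw [hbounds]
  have htail : ((0 :: (pvCutsFrom (c :: t) 0 ++ [(c :: t).length])).map ((Nat.cast) : Nat → Int)).tail
      = ((pvCutsFrom (c :: t) 0 ++ [(c :: t).length]).map (Nat.cast)) := by simp
  rw [htail, List.zip_map, List.map_map]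
  have hwords : ((List.zip (0 :: (pvCutsFrom (c :: t) 0 ++ [(c :: t).length]))
          (pvCutsFrom (c :: t) 0 ++ [(c :: t).length])).map
        ((fun p => PySem.List.slice (c :: t) (some p.1) (some p.2)) ∘ Prod.map (Nat.cast) (Nat.cast)))
      = ((List.zip (0 :: (pvCutsFrom (c :: t) 0 ++ [(c :: t).length]))
          (pvCutsFrom (c :: t) 0 ++ [(c :: t).length])).map
        (fun p => ((c :: t).drop p.1).take (p.2 - p.1))) := by
    refine List.map_congr_left ?_
    intro p _
    simp [Function.comp, PySem.List.slice_natCast]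
  rw [hwords, join_segments (c :: t) (pvCutsFrom (c :: t) 0) 0]
  have hupper : PySem.Chars.upper (pvSegJoin (c :: t) 0 (pvCutsFrom (c :: t) 0))
      = List.map PySem.Chars.upperChar (pvSegJoin (c :: t) 0 (pvCutsFrom (c :: t) 0)) := by
    simp [PySem.Chars.upper]
  rw [hupper, segJoin_cuts (c :: t) ((c :: t).length - 1 - 0) 0 (by simp) rfl, List.drop_zero]
  rfl
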